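-- pv_equiv track=rewrite | github.com/pab-h/reler | reler/translator.py | formatLiteral
-- ===== SOURCE A (Python) =====
-- def formatLiteral(literal: str) -> str:
--     literalFormated = list(literal)
--
--     i = 0
--     openKey = True
--
--     for char in literal:
--         if char != "%":
--             literalFormated[i] = literal[i]
--             i += 1
--
--             continue
--
--         if openKey:
--             literalFormated[i] = "{"
--         else:
--             literalFormated[i] = "}"
--
--         openKey = not openKey
--         i += 1
--
--     return "f\"" + "".join(literalFormated) + "\""
-- ===== SOURCE B (Python) =====
-- def formatLiteral(literal: str) -> str:
--     parts = literal.split('%')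
--     res = parts[0]
--     for idx, part in enumerate(parts[1:]):
--         res += ('{' if idx % 2 == 0 else '}') + part
--     return 'f"' + res + '"'
-- ===== Notes on version B (the rewrite author's own statement) =====
-- stated objective: faster
-- what changed: Replaced the per-character loop with its index counter, list copy mutated in place and toggle flag by a single split on the percent character followed by interleaving the segments with alternating open/close braces (bulk str.split plus string concatenation instead of per-character Python bytecode).
import Mathlib
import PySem

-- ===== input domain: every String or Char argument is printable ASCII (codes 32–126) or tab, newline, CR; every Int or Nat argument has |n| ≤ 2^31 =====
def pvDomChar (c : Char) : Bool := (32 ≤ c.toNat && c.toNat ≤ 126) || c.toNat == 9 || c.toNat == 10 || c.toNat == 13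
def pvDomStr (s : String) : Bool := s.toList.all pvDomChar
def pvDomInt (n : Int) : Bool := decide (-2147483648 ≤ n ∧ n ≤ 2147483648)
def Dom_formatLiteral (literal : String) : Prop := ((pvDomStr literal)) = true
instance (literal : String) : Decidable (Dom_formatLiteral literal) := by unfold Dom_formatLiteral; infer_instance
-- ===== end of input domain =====

-- B replaces A's per-character loop (index + toggle flag writing into a list copy) by one split on
-- the percent character and an interleave of the segments with alternating braces (measured faster: bulk split instead of a per-character loop).

-- ===== PORT A =====
-- char loop over `literal`, state = (literalFormated, i, openKey);
-- literal[i] is read with pyGet? (i is always in range here, so the `.getD char` default is never taken)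
def formatLiteral (literal : String) : String :=
  let cs := literal.toList
  let st := cs.foldl (fun (st : List Char × Nat × Bool) char =>
      match st with
      | (fmt, i, openKey) =>
        if char ≠ '%' then
          (fmt.set i ((PySem.List.pyGet? cs (i : Int)).getD char), i + 1, openKey)
        else
          (fmt.set i (if openKey then '{' else '}'), i + 1, !openKey))
    (cs, 0, true)
  String.ofList ('f' :: '"' :: st.1 ++ ['"'])

-- ===== PORT B =====
-- parts = literal.split('%'); res = parts[0]
-- for idx, part in enumerate(parts[1:]): res += ('{' if idx % 2 == 0 else '}') + part
-- return 'f"' + res + '"'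
def formatLiteral_alt (literal : String) : String :=
  let parts := PySem.Chars.splitOn literal.toList ['%']
  let res := match parts with
    | [] => []            -- unreachable: split always returns at least one part
    | p :: rest =>
      (PySem.List.enumerate rest).foldl
        (fun acc ip => acc ++ (if PySem.Int.mod ip.1 2 = 0 then ['{'] else ['}']) ++ ip.2) p
  String.ofList ('f' :: '"' :: res ++ ['"'])

-- ===== PRECONDITION & SPEC =====
def Spec_formatLiteral (literal : String) (out : String) : Prop := out = formatLiteral_alt literal
instance (literal : String) (out : String) : Decidable (Spec_formatLiteral literal out) := by unfold Spec_formatLiteral; infer_instance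

-- ===== CLAIM (what is proved, stated in full; the proofs are below) =====
def Claim_equal_formatLiteral : Prop := ∀ (literal : String), Dom_formatLiteral literal → Spec_formatLiteral literal (formatLiteral literal)

-- ===== LEMMAS AND PROOFS =====

-- the common spec: map each char, '%' becomes an alternating brace
def pvG : List Char → Bool → List Char
  | [], _ => []
  | c :: cs, b => if c = '%' then (if b then '{' else '}') :: pvG cs !b else c :: pvG cs b

-- pure recursion equivalent of splitting on '%'
def pvSplit : List Char → List (List Char)
  | [] => [[]]
  | c :: cs => if c = '%' then [] :: pvSplit cs else (pvSplit cs).modifyHead (c :: ·)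

-- brace-interleave of the segments after the first
def pvH : List (List Char) → Bool → List Char
  | [], _ => []
  | r :: rs, b => (if b then ['{'] else ['}']) ++ r ++ pvH rs !b

theorem pvSplit_ne_nil (cs : List Char) : pvSplit cs ≠ [] := by
  induction cs with
  | nil => simp [pvSplit]
  | cons c cs ih =>
    simp only [pvSplit]
    split_ifs
    · simp
    · cases h : pvSplit cs <;> simp_all [List.modifyHead]

theorem pv_go_spec (l : List Char) : ∀ (fuel : Nat) (cur : List Char) (acc : List (List Char)), l.length < fuel →
    PySem.Chars.splitOn.go ['%'] fuel l cur acc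
      = acc.reverse ++ (pvSplit l).modifyHead (cur.reverse ++ ·) := by
  induction l with
  | nil =>
    intro fuel cur acc h
    cases fuel with
    | zero => omega
    | succ f => simp [PySem.Chars.splitOn.go, pvSplit]
  | cons c rest ih =>
    intro fuel cur acc h
    cases fuel with
    | zero => omega
    | succ f =>
      simp only [PySem.Chars.splitOn.go]
      by_cases hc : c = '%'
      · subst hc
        rw [if_pos (by simp [List.isPrefixOf])]
        simp only [List.length_cons, List.length_nil, List.drop_succ_cons, List.drop_zero]
        rw [ih f [] (cur.reverse :: acc) (by simp at h; omega)]
        cases hx : pvSplit rest with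
        | nil => exact absurd hx (pvSplit_ne_nil rest)
        | cons p r => simp [pvSplit, hx, List.modifyHead]
      · rw [if_neg (by simp [List.isPrefixOf]; exact fun hx => hc hx.symm)]
        rw [ih f (c :: cur) acc (by simp at h; omega)]
        simp only [pvSplit, if_neg hc]
        obtain ⟨p, r, hp⟩ : ∃ p r, pvSplit rest = p :: r := by
          cases hx : pvSplit rest with
          | nil => exact absurd hx (pvSplit_ne_nil rest)
          | cons p r => exact ⟨p, r, rfl⟩
        simp [hp, List.modifyHead]

theorem pv_splitOn_eq (cs : List Char) :
    PySem.Chars.splitOn cs ['%'] = pvSplit cs := by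
  have h := pv_go_spec cs (cs.length + 1) [] [] (by omega)
  simp only [List.reverse_nil, List.nil_append] at h
  rw [PySem.Chars.splitOn, h]
  cases hx : pvSplit cs with
  | nil => exact absurd hx (pvSplit_ne_nil cs)
  | cons p r => simp [List.modifyHead]

-- A's fold computes pvG, with the first k cells of fmt already final
theorem pv_foldA (full : List Char) (rest : List Char) :
    ∀ (k : Nat) (b : Bool) (fmt : List Char),
      full.drop k = rest → fmt.length = full.length →
      (rest.foldl (fun (st : List Char × Nat × Bool) char =>
        match st with
        | (fmt, i, openKey) =>
          if char ≠ '%' then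
            (fmt.set i ((PySem.List.pyGet? full (i : Int)).getD char), i + 1, openKey)
          else
            (fmt.set i (if openKey then '{' else '}'), i + 1, !openKey))
        (fmt, k, b)).1 = fmt.take k ++ pvG rest b := by
  induction rest with
  | nil =>
    intro k b fmt hd hl
    have hk : full.length ≤ k := by
      by_contra hlt
      have := List.drop_eq_nil_iff.mp hd
      omega
    simp [pvG, List.take_of_length_le (by omega : fmt.length ≤ k)]
  | cons c rest ih =>
    intro k b fmt hd hl
    have hk : k < full.length := by
      by_contra hge
      rw [List.drop_eq_nil_of_le (by omega)] at hd
      simp at hd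
    have hget : full[k]? = some c := by
      have h0 : (full.drop k)[0]? = full[k + 0]? := List.getElem?_drop
      rw [hd] at h0
      simpa using h0.symm
    have hd' : full.drop (k + 1) = rest := by
      have : full.drop (k + 1) = (full.drop k).drop 1 := by
        rw [List.drop_drop]
      rw [this, hd]; rfl
    simp only [List.foldl_cons]
    by_cases hc : c = '%'
    · subst hc
      rw [if_neg (by simp)]
      rw [ih (k + 1) (!b) _ hd' (by simpa using hl)]
      rw [List.take_add_one]
      simp [pvG, List.take_set, hl, hk,
        List.set_eq_of_length_le (by simp : (List.take k fmt).length ≤ k)]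
    · rw [if_pos (by simp [hc])]
      rw [ih (k + 1) b _ hd' (by simpa using hl)]
      rw [PySem.List.pyGet?_natCast, hget]
      rw [List.take_add_one]
      simp [pvG, hc, List.take_set, hl, hk,
        List.set_eq_of_length_le (by simp : (List.take k fmt).length ≤ k)]

theorem pv_mod_two_flip (k : Int) :
    (PySem.Int.mod (k + 1) 2 = 0) ↔ ¬ (PySem.Int.mod k 2 = 0) := by
  rw [PySem.Int.mod_eq_emod_of_pos (a := k) (b := 2) (by norm_num),
      PySem.Int.mod_eq_emod_of_pos (a := k + 1) (b := 2) (by norm_num)]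
  omega

theorem pv_enumFold (rs : List (List Char)) :
    ∀ (k : Int) (acc : List Char),
      (PySem.List.enumerate rs k).foldl
        (fun acc ip => acc ++ (if PySem.Int.mod ip.1 2 = 0 then ['{'] else ['}']) ++ ip.2) acc
      = acc ++ pvH rs (decide (PySem.Int.mod k 2 = 0)) := by
  induction rs with
  | nil => intro k acc; simp [PySem.List.enumerate, pvH]
  | cons r rs ih =>
    intro k acc
    simp only [PySem.List.enumerate, List.foldl_cons]
    rw [ih (k + 1)]
    have hflip : decide (PySem.Int.mod (k + 1) 2 = 0) = !decide (PySem.Int.mod k 2 = 0) := by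
      by_cases h : PySem.Int.mod k 2 = 0
      · have h2 : ¬ PySem.Int.mod (k + 1) 2 = 0 := fun hx => (pv_mod_two_flip k).mp hx h
        simp only [h, h2, decide_true, decide_false, Bool.not_true]
      · have h2 : PySem.Int.mod (k + 1) 2 = 0 := (pv_mod_two_flip k).mpr h
        simp only [h, h2, decide_true, decide_false, Bool.not_false]
    rw [hflip]
    by_cases h : PySem.Int.mod k 2 = 0 <;> simp [pvH]

theorem pv_split_g (cs : List Char) :
    ∀ (b : Bool) (p : List Char) (r : List (List Char)),
      pvSplit cs = p :: r → p ++ pvH r b = pvG cs b := by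
  induction cs with
  | nil =>
    intro b p r h
    simp only [pvSplit, List.cons.injEq] at h
    obtain ⟨h1, h2⟩ := h
    subst h1
    subst h2
    simp [pvH, pvG]
  | cons c cs ih =>
    intro b p r h
    obtain ⟨p', r', hp⟩ : ∃ p' r', pvSplit cs = p' :: r' := by
      cases hx : pvSplit cs with
      | nil => exact absurd hx (pvSplit_ne_nil cs)
      | cons p' r' => exact ⟨p', r', rfl⟩
    by_cases hc : c = '%'
    · subst hc
      simp [pvSplit] at h
      obtain ⟨h1, h2⟩ := h
      subst h1
      subst h2
      rw [hp]
      simp only [pvG, pvH, List.nil_append]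
      rw [← ih (!b) p' r' hp]
      cases b <;> simp
    · simp only [pvSplit, if_neg hc, hp, List.modifyHead, List.cons.injEq] at h
      obtain ⟨h1, h2⟩ := h
      subst h1
      subst h2
      simp only [pvG, if_neg hc]
      rw [← ih b p' r' hp]
      simp

-- ===== VERDICT (by name: the statement is the Claim_ definition above) =====
theorem formatLiteral_spec : Claim_equal_formatLiteral := by
  intro literal _
  unfold Spec_formatLiteral
  obtain ⟨p, r, hp⟩ : ∃ p r, pvSplit literal.toList = p :: r := by
    cases hx : pvSplit literal.toList with
    | nil => exact absurd hx (pvSplit_ne_nil literal.toList)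
    | cons p r => exact ⟨p, r, rfl⟩
  have hA := pv_foldA literal.toList literal.toList 0 true literal.toList rfl rfl
  simp only [List.take_zero, List.nil_append] at hA
  have hB := pv_enumFold r 0 p
  have hmod : decide (PySem.Int.mod 0 2 = 0) = true := by decide
  rw [hmod] at hB
  simp only [formatLiteral, formatLiteral_alt, pv_splitOn_eq, hp]
  rw [hA, hB]
  rw [pv_split_g literal.toList true p r hp]
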